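-- pv_equiv track=rewrite | github.com/jooseop/coding-test | prg_게임아이템.py | solution
-- ===== SOURCE A (Python) =====
-- from heapq import heapify, heappush, heappop
-- from collections import deque
--
-- def solution(healths, items):
--     answer = []
--     heap = []
--
--     healths.sort() # 체력 오름차순 정렬 // O(N log N)
--     items = deque(sorted([(item[1], item[0], index + 1) for index, item in enumerate(items)])) # 낮추는 체력, 높이는 공격치, 인덱스 // enumerate, list comprehension
--
--     for health in healths: # 제일 낮은 체력부터 루프
--
--         while items: # 아이템 루프
--             debuff, buff, index = items[0] # 있는 아이템중 가장 낮추는 체력이 낮은 아이템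
--
--             if health - debuff < 100: # 체력을 낮췄는데 100보다 작음
--                 break # 루프 종료
--
--             # 체력 조건을 통과한 경우
--             items.popleft() # 아이템 사용했으니까 없애줌 // 어차피 다음 체력에서는 무조건 가능하고, 만약 지금 당장 item을 안쓰더라도 heap에 있기 때문에 다음에 아이템을 사용할 수 있다.
--             heappush(heap, (-buff, index)) # 힙에 사용한 버프랑, 인덱스번호를 max heap 기준으로 넣어줌, 여러가지 item이 들어가면 공격력이 강한 순으로 정렬됨 // O(log N)
--
--         if heap: # heap에 아이템이 있으면
--             _, index = heappop(heap) # 공격력 최대인 것을 pop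
--             answer.append(index)
--
--     return sorted(answer)
-- ===== SOURCE B (Python) =====
-- # B: no heap, no deque, no pre-sorting of items: for each health (ascending) scan
-- # all items once, picking the unused eligible item with the highest buff (lowest
-- # index on ties) via a running best.  NOTE: A sorts `healths` in place; B does not
-- # mutate its arguments (the equivalence claimed is about the return value).
-- def solution(healths, items):
--     used = set()
--     ans = []
--     for h in sorted(healths):
--         best = None
--         for i, it in enumerate(items, 1):
--             if i in used or it[1] > h - 100:
--                 continue
--             key = (it[0], -i)
--             if best is None or key > best:
--                 best = key
--         if best is not None:
--             used.add(-best[1])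
--             ans.append(-best[1])
--     return sorted(ans)
-- ===== Notes on version B (the rewrite author's own statement) =====
-- stated objective: simpler
-- what changed: Drops the heap, the deque and the item pre-sort entirely: B keeps a used-index set and, for each health in ascending order, does one linear scan of all items picking the unused eligible item with the highest (buff, -index) via a running best.
import Mathlib
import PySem

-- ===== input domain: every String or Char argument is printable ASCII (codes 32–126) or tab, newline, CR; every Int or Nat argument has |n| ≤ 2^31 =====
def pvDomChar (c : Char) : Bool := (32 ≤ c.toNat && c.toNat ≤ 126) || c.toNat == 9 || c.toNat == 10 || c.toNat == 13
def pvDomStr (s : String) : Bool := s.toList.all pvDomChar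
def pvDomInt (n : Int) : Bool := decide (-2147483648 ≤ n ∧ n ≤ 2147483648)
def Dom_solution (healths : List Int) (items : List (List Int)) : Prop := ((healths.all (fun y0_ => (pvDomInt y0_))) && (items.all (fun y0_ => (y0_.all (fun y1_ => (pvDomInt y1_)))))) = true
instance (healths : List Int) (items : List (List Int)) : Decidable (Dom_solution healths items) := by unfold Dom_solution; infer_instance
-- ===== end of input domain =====

-- B drops A's heap, deque and item pre-sort: a used-index set plus one linear scan of all
-- items per health picks the unused eligible item with the highest (buff, -index).
-- A sorts `healths` in place, B does not mutate its arguments — the claim is about the return value.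

-- ===== PORT A =====
-- heapq heap of (-buff, index) pairs, modeled as a ≤-sorted list over the lexicographic
-- order on Int × Int (exact here: the heap is only observed via min-pop and emptiness).
def eatA (h : Int) : List (Int × Int × Int) → List (Int ×ₗ Int) → List (Int × Int × Int) × List (Int ×ₗ Int)
  | [], heap => ([], heap)
  | (d, b, ix) :: rest, heap =>
    if h - d < 100 then ((d, b, ix) :: rest, heap)
    else eatA h rest (List.orderedInsert (· ≤ ·) (toLex (-b, ix)) heap)

def loopA : List Int → List (Int × Int × Int) → List (Int ×ₗ Int) → List Int → List Int
  | [], _, _, ans => ans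
  | h :: hs, its, heap, ans =>
    match eatA h its heap with
    | (its', heap') =>
      match heap' with
      | [] => loopA hs its' [] ans
      | x :: t => loopA hs its' t (ans ++ [(ofLex x).2])

-- item[1] / item[0] read with pyGetD (Python raises IndexError on items shorter than 2:
-- excluded by Pre_solution below)
def solution (healths : List Int) (items : List (List Int)) : List Int :=
  PySem.List.sorted
    (loopA (PySem.List.sorted healths (fun x => x) false)
      (PySem.List.sorted
        ((PySem.List.enumerate items 0).map
          (fun p => (PySem.List.pyGetD p.2 1 0, PySem.List.pyGetD p.2 0 0, p.1 + 1)))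
        (fun t => (toLex (t.1, toLex t.2) : Int ×ₗ (Int ×ₗ Int))) false)
      [] [])
    (fun x => x) false

-- ===== PORT B =====
-- the inner `for i, it in enumerate(items, 1)` with its running `best` (a (buff, -i)
-- tuple compared lexicographically, None = no eligible item seen yet)
def scanB (h : Int) (used : List Int) : List (Int × List Int) → Option (Int ×ₗ Int) → Option (Int ×ₗ Int)
  | [], best => best
  | (i, it) :: rest, best =>
    if PySem.Set.contains used i ∨ h - 100 < PySem.List.pyGetD it 1 0 then
      scanB h used rest best
    else
      scanB h used rest (some (match best with
        | none => toLex (PySem.List.pyGetD it 0 0, -i)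
        | some b =>
            if b < toLex (PySem.List.pyGetD it 0 0, -i) then toLex (PySem.List.pyGetD it 0 0, -i)
            else b))

-- the outer `for h in sorted(healths)` carrying the used set and the answer list
def loopAlt (items : List (List Int)) : List Int → List Int → List Int → List Int
  | [], _, ans => ans
  | h :: hs, used, ans =>
    match scanB h used (PySem.List.enumerate items 1) none with
    | none => loopAlt items hs used ans
    | some key => loopAlt items hs (PySem.Set.add used (-(ofLex key).2)) (ans ++ [-(ofLex key).2])

def solution_alt (healths : List Int) (items : List (List Int)) : List Int :=
  PySem.List.sorted (loopAlt items (PySem.List.sorted healths (fun x => x) false) [] [])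
    (fun x => x) false

-- ===== PRECONDITION & SPEC =====
-- Python A raises IndexError (item[1]/item[0]) whenever some item has fewer than 2 entries;
-- exactly those inputs are excluded (B raises there too as soon as healths is non-empty).
def Pre_solution (healths : List Int) (items : List (List Int)) : Prop :=
  ∀ it ∈ items, 2 ≤ it.length
instance (healths : List Int) (items : List (List Int)) : Decidable (Pre_solution healths items) := by unfold Pre_solution; infer_instance
def pvWitness_solution : List Int × List (List Int) := ([150, 100], [[20, 10], [5, 2]])

def Spec_solution (healths : List Int) (items : List (List Int)) (out : List Int) : Prop := out = solution_alt healths items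
instance (healths : List Int) (items : List (List Int)) (out : List Int) : Decidable (Spec_solution healths items out) := by unfold Spec_solution; infer_instance

-- ===== CLAIM (what is proved, stated in full; the proofs are below) =====
def Claim_equal_solution : Prop := ∀ (healths : List Int) (items : List (List Int)), Dom_solution healths items → Pre_solution healths items → Spec_solution healths items (solution healths items)

-- ===== LEMMAS AND PROOFS =====

-- Proof-side intermediate program: A's heap replaced by an unordered pool of (buff, -index)
-- pairs, the pointer still advancing over the sorted item list.  A = P by a heap/pool
-- permutation invariant; P = B by an extensional invariant (pool ≈ eligible unused items).
def eatP (h : Int) : List (Int × Int × Int) → List (Int × Int) → List (Int × Int × Int) × List (Int × Int)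
  | [], pool => ([], pool)
  | (d, b, ix) :: rest, pool =>
    if 100 ≤ h - d then eatP h rest (pool ++ [(b, -ix)])
    else ((d, b, ix) :: rest, pool)

def loopP : List Int → List (Int × Int × Int) → List (Int × Int) → List Int → List Int
  | [], _, _, ans => ans
  | h :: hs, rem, pool, ans =>
    match eatP h rem pool with
    | (rem', pool') =>
      match PySem.List.max? pool' (fun t => (toLex t : Int ×ₗ Int)) with
      | none => loopP hs rem' pool' ans
      | some best => loopP hs rem' (pool'.erase best) (ans ++ [-best.2])

-- heap element corresponding to a pool element
def pf (p : Int × Int) : Int ×ₗ Int := toLex (-p.1, -p.2)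

theorem pf_injective : Function.Injective pf := by
  intro a b hab
  have h1 := congrArg (fun x => (ofLex x).1) hab
  have h2 := congrArg (fun x => (ofLex x).2) hab
  simp [pf] at h1 h2
  exact Prod.ext h1 h2

theorem pf_le_of_key_le (x y : Int × Int) (h : (toLex x : Int ×ₗ Int) ≤ toLex y) :
    pf y ≤ pf x := by
  rw [Prod.Lex.le_iff] at h ⊢
  simp [pf] at *
  omega

theorem eat_rel (h : Int) : ∀ (rem : List (Int × Int × Int)) (heap : List (Int ×ₗ Int)) (pool : List (Int × Int)),
    heap.Perm (pool.map pf) → heap.Pairwise (· ≤ ·) →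
    (eatA h rem heap).1 = (eatP h rem pool).1 ∧
    (eatA h rem heap).2.Perm ((eatP h rem pool).2.map pf) ∧
    (eatA h rem heap).2.Pairwise (· ≤ ·)
  | [], heap, pool, hperm, hsort => by
      simpa [eatA, eatP] using ⟨hperm, hsort⟩
  | (d, b, ix) :: rest, heap, pool, hperm, hsort => by
      by_cases hc : h - d < 100
      · have hc' : ¬ (100 ≤ h - d) := by omega
        simp [eatA, eatP, hc, hc']
        exact ⟨hperm, hsort⟩
      · have hc' : (100 ≤ h - d) := by omega
        simp only [eatA, eatP, hc, hc', if_true, if_false]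
        apply eat_rel h rest
        · refine (List.perm_orderedInsert _ _ _).trans ?_
          rw [List.map_append]
          refine (hperm.cons (toLex (-b, ix))).trans ?_
          have hx : pf (b, -ix) = toLex (-b, ix) := by simp [pf]
          simpa [hx] using (List.perm_append_singleton (toLex (-b, ix)) (pool.map pf)).symm
        · exact List.Pairwise.orderedInsert _ _ hsort

theorem loop_rel : ∀ (hs : List Int) (rem : List (Int × Int × Int)) (heap : List (Int ×ₗ Int))
    (pool : List (Int × Int)) (ans : List Int),
    heap.Perm (pool.map pf) → heap.Pairwise (· ≤ ·) →
    loopA hs rem heap ans = loopP hs rem pool ans := by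
  intro hs
  induction hs with
  | nil => intro rem heap pool ans _ _; rfl
  | cons h hs ih =>
    intro rem heap pool ans hperm hsort
    obtain ⟨h1, h2, h3⟩ := eat_rel h rem heap pool hperm hsort
    simp only [loopA, loopP]
    rcases hA : eatA h rem heap with ⟨ra, ha⟩
    rcases hB : eatP h rem pool with ⟨rb, pb⟩
    rw [hA] at h1 h2 h3
    rw [hB] at h1 h2
    simp only at h1 h2 h3
    subst h1
    cases ha with
    | nil =>
      have hpb : pb = [] := by
        have := h2.symm.eq_nil
        simpa using this
      subst hpb
      have hnone : PySem.List.max? ([] : List (Int × Int)) (fun t => (toLex t : Int ×ₗ Int)) = none := by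
        rw [PySem.List.max?_eq_none_iff]
      simp only [hnone]
      exact ih _ _ _ _ (by simp) (by simp)
    | cons x t =>
      obtain ⟨best, hbest⟩ : ∃ best, PySem.List.max? pb (fun t => (toLex t : Int ×ₗ Int)) = some best := by
        cases hm : PySem.List.max? pb (fun t => (toLex t : Int ×ₗ Int)) with
        | none =>
          rw [PySem.List.max?_eq_none_iff] at hm
          subst hm
          simp at h2
        | some b => exact ⟨b, rfl⟩
      have hmem : best ∈ pb := PySem.List.max?_mem hbest
      have hmax : ∀ y ∈ pb, (toLex y : Int ×ₗ Int) ≤ toLex best := PySem.List.max?_isMax hbest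
      have hxb : x = pf best := by
        apply le_antisymm
        · have hin : pf best ∈ x :: t := h2.symm.subset (List.mem_map_of_mem hmem)
          rcases List.mem_cons.mp hin with heq | hin
          · exact le_of_eq heq.symm
          · exact (List.pairwise_cons.mp h3).1 _ hin
        · have hx : x ∈ pb.map pf := h2.subset (List.mem_cons_self)
          obtain ⟨y, hy, hyx⟩ := List.mem_map.mp hx
          have := pf_le_of_key_le y best (hmax y hy)
          rwa [hyx] at this
      have hans : (ofLex x).2 = -best.2 := by rw [hxb]; simp [pf]
      simp only [hbest, hans]
      apply ih
      · rw [List.map_erase pf_injective, ← hxb]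
        have := h2.erase x
        rwa [List.erase_cons_head] at this
      · exact (List.pairwise_cons.mp h3).2

theorem keyed_eq (items : List (List Int)) :
    ((PySem.List.enumerate items 0).map
        (fun p => (PySem.List.pyGetD p.2 1 0, PySem.List.pyGetD p.2 0 0, p.1 + 1))) =
    ((PySem.List.enumerate items 1).map
        (fun p => (PySem.List.pyGetD p.2 1 0, PySem.List.pyGetD p.2 0 0, p.1))) := by
  simp [PySem.List.enumerate_eq_zipIdx_map, List.map_map]
  intro a b _
  omega

-- ===== P = B: abbreviations =====
def tripP (p : Int × List Int) : Int × Int × Int :=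
  (PySem.List.pyGetD p.2 1 0, PySem.List.pyGetD p.2 0 0, p.1)
def pairP (t : Int × Int × Int) : Int × Int := (t.2.1, -t.2.2)
def qP (used : List Int) (t : Int × Int × Int) : Bool := !(PySem.Set.contains used t.2.2)
def keyOfP (p : Int × List Int) : Int ×ₗ Int := toLex (PySem.List.pyGetD p.2 0 0, -p.1)
def eligP (h : Int) (used : List Int) (p : Int × List Int) : Bool :=
  !(PySem.Set.contains used p.1 || decide (h - 100 < PySem.List.pyGetD p.2 1 0))

theorem max_if (a b : Int ×ₗ Int) : (if a < b then b else a) = max a b := by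
  rcases le_or_gt b a with h|h
  · rw [if_neg (not_lt.mpr h), max_eq_left h]
  · rw [if_pos h, max_eq_right h.le]

theorem scan_some (h : Int) (used : List Int) : ∀ (l : List (Int × List Int)) (x : Int ×ₗ Int),
    scanB h used l (some x) = some (((l.filter (eligP h used)).map keyOfP).foldl max x) := by
  intro l
  induction l with
  | nil => intro x; rfl
  | cons p rest ih =>
    intro x
    obtain ⟨i, it⟩ := p
    by_cases hc : PySem.Set.contains used i ∨ h - 100 < PySem.List.pyGetD it 1 0
    · have he : eligP h used (i, it) = false := by
        simp only [eligP, Bool.not_eq_false', Bool.or_eq_true, decide_eq_true_eq]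
        exact hc
      simp only [scanB, if_pos hc, List.filter_cons, he]
      exact ih x
    · have he : eligP h used (i, it) = true := by
        rw [not_or] at hc
        simp only [eligP, Bool.not_eq_true', Bool.or_eq_false_iff, decide_eq_false_iff_not]
        exact ⟨Bool.eq_false_iff.mpr hc.1, hc.2⟩
      simp only [scanB, if_neg hc, List.filter_cons, he, if_true, List.map_cons, List.foldl_cons]
      rw [ih, max_if]
      rfl

theorem scan_none (h : Int) (used : List Int) : ∀ (l : List (Int × List Int)),
    scanB h used l none = ((l.filter (eligP h used)).map keyOfP).max? := by
  intro l
  induction l with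
  | nil => rfl
  | cons p rest ih =>
    obtain ⟨i, it⟩ := p
    by_cases hc : PySem.Set.contains used i ∨ h - 100 < PySem.List.pyGetD it 1 0
    · have he : eligP h used (i, it) = false := by
        simp only [eligP, Bool.not_eq_false', Bool.or_eq_true, decide_eq_true_eq]
        exact hc
      simp only [scanB, if_pos hc, List.filter_cons, he]
      exact ih
    · have he : eligP h used (i, it) = true := by
        rw [not_or] at hc
        simp only [eligP, Bool.not_eq_true', Bool.or_eq_false_iff, decide_eq_false_iff_not]
        exact ⟨Bool.eq_false_iff.mpr hc.1, hc.2⟩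
      simp only [scanB, if_neg hc, List.filter_cons, he, if_true, List.map_cons]
      rw [scan_some, List.max?_cons']
      rfl

theorem scan_vs_pool (h : Int) (used : List Int) (enum : List (Int × List Int)) (pool : List (Int × Int))
    (hperm : ((enum.filter (eligP h used)).map keyOfP).Perm (pool.map (fun t => (toLex t : Int ×ₗ Int)))) :
    scanB h used enum none = (PySem.List.max? pool (fun t => (toLex t : Int ×ₗ Int))).map (fun t => (toLex t : Int ×ₗ Int)) := by
  rw [scan_none]
  cases hm : PySem.List.max? pool (fun t => (toLex t : Int ×ₗ Int)) with
  | none =>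
    rw [PySem.List.max?_eq_none_iff] at hm
    subst hm
    simp only [Option.map_none]
    rw [List.max?_eq_none_iff]
    exact hperm.eq_nil
  | some m =>
    have hmem : m ∈ pool := PySem.List.max?_mem hm
    have hmax := PySem.List.max?_isMax hm
    simp only [Option.map_some]
    rw [List.max?_eq_some_iff]
    constructor
    · exact hperm.symm.subset (List.mem_map_of_mem hmem)
    · intro b hb
      obtain ⟨y, hy, hyb⟩ := List.mem_map.mp (hperm.subset hb)
      rw [← hyb]
      exact hmax y hy

theorem eatP_spec (h : Int) : ∀ (rem : List (Int × Int × Int)) (pool : List (Int × Int)),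
    (rem.map (fun t => t.1)).Pairwise (· ≤ ·) →
    ∃ con, rem = con ++ (eatP h rem pool).1 ∧
      (eatP h rem pool).2 = pool ++ con.map pairP ∧
      (∀ t ∈ con, t.1 ≤ h - 100) ∧
      (∀ t ∈ (eatP h rem pool).1, h - 100 < t.1)
  | [], pool, _ => ⟨[], by simp [eatP]⟩
  | (d, b, ix) :: rest, pool, hpw => by
    by_cases hc : 100 ≤ h - d
    · obtain ⟨con, h1, h2, h3, h4⟩ := eatP_spec h rest (pool ++ [(b, -ix)]) (by
        simpa using (List.pairwise_cons.mp (by simpa using hpw)).2)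
      refine ⟨(d, b, ix) :: con, ?_, ?_, ?_, ?_⟩
      · simp only [eatP, if_pos hc]
        simpa using h1
      · simp only [eatP, if_pos hc]
        rw [h2]
        simp [pairP]
      · intro t ht
        rcases List.mem_cons.mp ht with rfl | ht
        · simp; omega
        · exact h3 t ht
      · simp only [eatP, if_pos hc]
        exact h4
    · refine ⟨[], by simp [eatP, hc], by simp [eatP, hc], by simp, ?_⟩
      simp only [eatP, if_neg hc]
      intro t ht
      have hpw' := hpw
      rw [List.map_cons, List.pairwise_cons] at hpw'
      rcases List.mem_cons.mp ht with rfl | ht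
      · omega
      · have := hpw'.1 t.1 (List.mem_map_of_mem ht)
        omega

theorem contains_add_self (s : List Int) (x : Int) :
    PySem.Set.contains (PySem.Set.add s x) x = true := by
  simp only [PySem.Set.add, PySem.Set.contains]
  split <;> simp_all

theorem contains_add_ne (s : List Int) (x y : Int) (hne : y ≠ x) :
    PySem.Set.contains (PySem.Set.add s x) y = PySem.Set.contains s y := by
  simp only [PySem.Set.add, PySem.Set.contains]
  split
  · rfl
  · simp [hne]

theorem qP_add_ne (used : List Int) (x : Int) (t : Int × Int × Int) (hne : t.2.2 ≠ x) :
    qP (PySem.Set.add used x) t = qP used t := by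
  simp only [qP, contains_add_ne _ _ _ hne]

theorem filter_add_erase : ∀ (L : List (Int × Int × Int)) (used : List Int) (t0 : Int × Int × Int),
    (L.map (fun t => t.2.2)).Nodup → t0 ∈ L → qP used t0 = true →
    (L.filter (qP (PySem.Set.add used t0.2.2))).map pairP
      = ((L.filter (qP used)).map pairP).erase (pairP t0)
  | [], used, t0, _, h0, _ => absurd h0 (List.not_mem_nil)
  | a :: L, used, t0, hnd, h0, hq0 => by
    rw [List.map_cons, List.nodup_cons] at hnd
    by_cases hix : a.2.2 = t0.2.2
    · have ha : a = t0 := by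
        rcases List.mem_cons.mp h0 with rfl | h0'
        · rfl
        · exact absurd (hix ▸ List.mem_map_of_mem h0') hnd.1
      subst ha
      have hqa : qP (PySem.Set.add used a.2.2) a = false := by
        simp only [qP, contains_add_self, Bool.not_true]
      rw [List.filter_cons, List.filter_cons, hqa, hq0]
      simp only [if_true, List.map_cons]
      rw [List.erase_cons_head]
      congr 1
      apply List.filter_congr
      intro t ht
      have hne : t.2.2 ≠ a.2.2 := fun he => hnd.1 (he ▸ List.mem_map_of_mem ht)
      exact qP_add_ne _ _ _ hne
    · have ht0 : t0 ∈ L := by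
        rcases List.mem_cons.mp h0 with rfl | h0'
        · exact absurd rfl hix
        · exact h0'
      have hne2 : pairP a ≠ pairP t0 := by
        intro he
        exact hix (by have := congrArg (fun p => -p.2) he; simpa [pairP] using this)
      have hrec := filter_add_erase L used t0 hnd.2 ht0 hq0
      cases hqa : qP used a with
      | true =>
        have hqa' : qP (PySem.Set.add used t0.2.2) a = true := by
          rw [qP_add_ne _ _ _ hix]; exact hqa
        rw [List.filter_cons, List.filter_cons, hqa, hqa']
        simp only [if_true, List.map_cons]
        rw [List.erase_cons_tail (by simpa using hne2), hrec]
      | false =>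
        have hqa' : qP (PySem.Set.add used t0.2.2) a = false := by
          rw [qP_add_ne _ _ _ hix]; exact hqa
        rw [List.filter_cons, List.filter_cons, hqa, hqa']
        simpa using hrec

theorem eligP_eq_q2 (h : Int) (used : List Int) (p : Int × List Int) :
    eligP h used p = (decide ((tripP p).1 ≤ h - 100) && qP used (tripP p)) := by
  simp only [eligP, qP, tripP, Bool.not_or]
  rcases le_or_gt (PySem.List.pyGetD p.2 1 0) (h - 100) with hle | hlt
  · simp [not_lt.mpr hle, Bool.and_comm]
    exact fun _ => hle
  · simp [hlt, not_le.mpr hlt]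

theorem loopPC (items : List (List Int)) : ∀ (hs : List Int) (P rem : List (Int × Int × Int))
    (pool : List (Int × Int)) (used ans : List Int),
    ((P ++ rem).map (fun t => t.2.2)).Nodup →
    (P ++ rem).Perm ((PySem.List.enumerate items 1).map tripP) →
    (rem.map (fun t => t.1)).Pairwise (· ≤ ·) →
    pool.Perm ((P.filter (qP used)).map pairP) →
    (∃ c : Int, (∀ t ∈ P, t.1 ≤ c) ∧ (∀ t ∈ rem, c < t.1) ∧ (∀ h ∈ hs, c ≤ h - 100)) →
    hs.Pairwise (· ≤ ·) →
    (∀ ix ∈ used, ix ∈ P.map (fun t => t.2.2)) →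
    loopP hs rem pool ans = loopAlt items hs used ans := by
  intro hs
  induction hs with
  | nil => intro P rem pool used ans _ _ _ _ _ _ _; rfl
  | cons h hs ih =>
    intro P rem pool used ans hnd henum hpw hpool hc hsort hused
    obtain ⟨c, hPc, hremc, hhc⟩ := hc
    rcases heq : eatP h rem pool with ⟨rem', pool'⟩
    obtain ⟨con, hrem, hpool', hcon, hrem'⟩ := eatP_spec h rem pool hpw
    rw [heq] at hrem hpool' hrem'
    simp only at hrem hpool' hrem'
    have hch : c ≤ h - 100 := hhc h List.mem_cons_self
    -- items still in rem are unused
    have hfresh : ∀ t ∈ rem, qP used t = true := by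
      intro t ht
      have hdisj := (List.nodup_append.mp (by rwa [List.map_append] at hnd)).2.2
      cases hq : qP used t with
      | false =>
        have hcc : PySem.Set.contains used t.2.2 = true := by
          cases hcc : PySem.Set.contains used t.2.2
          · rw [qP, hcc] at hq; simp at hq
          · rfl
        have hmemu : t.2.2 ∈ used := by simpa [PySem.Set.contains] using hcc
        exact ((hdisj _ (hused _ hmemu) _ (List.mem_map_of_mem ht)) rfl).elim
      | true => rfl
    have hconq : con.filter (qP used) = con :=
      List.filter_eq_self.mpr (fun t ht => hfresh t (hrem ▸ List.mem_append_left _ ht))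
    have hP'pool : pool'.Perm (((P ++ con).filter (qP used)).map pairP) := by
      rw [List.filter_append, hconq, List.map_append, hpool']
      exact hpool.append (List.Perm.refl _)
    have hP'le : ∀ t ∈ P ++ con, t.1 ≤ h - 100 := by
      intro t ht
      rcases List.mem_append.mp ht with ht | ht
      · exact le_trans (hPc t ht) hch
      · exact hcon t ht
    have hsplit : P ++ rem = (P ++ con) ++ rem' := by rw [hrem, List.append_assoc]
    -- the scanned key multiset is pool' (as a multiset)
    have hkey : (((PySem.List.enumerate items 1).filter (eligP h used)).map keyOfP).Perm
        (pool'.map (fun t => (toLex t : Int ×ₗ Int))) := by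
      have e1 : (PySem.List.enumerate items 1).filter (eligP h used)
          = (PySem.List.enumerate items 1).filter
              ((fun t => decide (t.1 ≤ h - 100) && qP used t) ∘ tripP) :=
        List.filter_congr (fun p _ => eligP_eq_q2 h used p)
      have e2 : (((PySem.List.enumerate items 1).filter (eligP h used)).map keyOfP)
          = (((PySem.List.enumerate items 1).map tripP).filter
              (fun t => decide (t.1 ≤ h - 100) && qP used t)).map (fun t => (toLex (pairP t) : Int ×ₗ Int)) := by
        rw [e1, List.filter_map, List.map_map]
        rfl
      rw [e2]
      have e3 : (((PySem.List.enumerate items 1).map tripP).filter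
            (fun t => decide (t.1 ≤ h - 100) && qP used t)).Perm
          (((P ++ con) ++ rem').filter (fun t => decide (t.1 ≤ h - 100) && qP used t)) :=
        (List.Perm.filter _ (hsplit ▸ henum.symm))
      have e4 : ((P ++ con) ++ rem').filter (fun t => decide (t.1 ≤ h - 100) && qP used t)
          = (P ++ con).filter (qP used) := by
        rw [List.filter_append]
        have e5 : rem'.filter (fun t => decide (t.1 ≤ h - 100) && qP used t) = [] := by
          rw [List.filter_eq_nil_iff]
          intro t ht
          simp [decide_eq_false (not_le.mpr (hrem' t ht))]
        have e6 : (P ++ con).filter (fun t => decide (t.1 ≤ h - 100) && qP used t)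
            = (P ++ con).filter (qP used) :=
          List.filter_congr (fun t ht => by simp [decide_eq_true (hP'le t ht)])
        rw [e5, e6, List.append_nil]
      have e34 := e3
      rw [e4] at e34
      refine (e34.map _).trans ?_
      simpa [List.map_map, Function.comp] using (hP'pool.map (fun t => (toLex t : Int ×ₗ Int))).symm
    have hcnew : ∀ h' ∈ hs, h - 100 ≤ h' - 100 := by
      intro h' hh'
      have := (List.pairwise_cons.mp hsort).1 h' hh'
      omega
    have hndP : (((P ++ con) ++ rem').map (fun t => t.2.2)).Nodup := by rwa [← hsplit]
    have henum' : ((P ++ con) ++ rem').Perm ((PySem.List.enumerate items 1).map tripP) := by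
      rwa [← hsplit]
    have hpw' : (rem'.map (fun t => t.1)).Pairwise (· ≤ ·) := by
      rw [hrem, List.map_append] at hpw
      exact (List.pairwise_append.mp hpw).2.1
    simp only [loopP, heq, loopAlt]
    rw [scan_vs_pool h used _ pool' hkey]
    cases hm : PySem.List.max? pool' (fun t => (toLex t : Int ×ₗ Int)) with
    | none =>
      simp only [Option.map_none]
      exact ih (P ++ con) rem' pool' used ans hndP henum' hpw' hP'pool
        ⟨h - 100, hP'le, hrem', hcnew⟩ (List.pairwise_cons.mp hsort).2
        (fun ix hix => by rw [List.map_append]; exact List.mem_append_left _ (hused ix hix))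
    | some m =>
      simp only [Option.map_some]
      obtain ⟨t0, ht0f, hpt0⟩ := List.mem_map.mp (hP'pool.subset (PySem.List.max?_mem hm))
      have ht0 : t0 ∈ P ++ con := List.mem_of_mem_filter ht0f
      have hq0 : qP used t0 = true := List.of_mem_filter ht0f
      have hixm : -(ofLex (toLex m)).2 = t0.2.2 := by
        rw [← hpt0]
        simp [pairP]
      have hperase : (pool'.erase m).Perm
          (((P ++ con).filter (qP (PySem.Set.add used t0.2.2))).map pairP) := by
        rw [filter_add_erase (P ++ con) used t0
          (by rw [List.map_append] at hndP; exact (List.nodup_append.mp hndP).1) ht0 hq0, hpt0]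
        exact hP'pool.erase m
      have hused' : ∀ ix ∈ PySem.Set.add used t0.2.2, ix ∈ (P ++ con).map (fun t => t.2.2) := by
        intro ix hix
        rcases (PySem.Set.mem_add used t0.2.2 ix).mp hix with hix | rfl
        · rw [List.map_append]; exact List.mem_append_left _ (hused ix hix)
        · exact List.mem_map_of_mem ht0
      have hix2 : -m.2 = t0.2.2 := hixm
      rw [hixm, hix2]
      exact ih (P ++ con) rem' (pool'.erase m) (PySem.Set.add used t0.2.2)
        (ans ++ [t0.2.2]) hndP henum' hpw' hperase
        ⟨h - 100, hP'le, hrem', hcnew⟩ (List.pairwise_cons.mp hsort).2 hused'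

theorem pyGetD_mem_or (l : List Int) (i d : Int) :
    PySem.List.pyGetD l i d = d ∨ PySem.List.pyGetD l i d ∈ l := by
  unfold PySem.List.pyGetD
  cases h : (PySem.List.pyGet? l i) with
  | none => simp
  | some v =>
    right
    unfold PySem.List.pyGet? at h
    rcases Option.bind_eq_some_iff.mp h with ⟨k, _, hv⟩
    simpa using List.mem_of_getElem? hv

theorem glue (healths : List Int) (items : List (List Int))
    (hh : ∀ x ∈ healths, -2147483648 ≤ x)
    (hi : ∀ it ∈ items, ∀ v ∈ it, -2147483648 ≤ v) :
    loopP (PySem.List.sorted healths (fun x => x) false)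
      (PySem.List.sorted ((PySem.List.enumerate items 1).map tripP)
        (fun t => (toLex (t.1, toLex t.2) : Int ×ₗ (Int ×ₗ Int))) false) [] []
    = loopAlt items (PySem.List.sorted healths (fun x => x) false) [] [] := by
  set keyedB := PySem.List.sorted ((PySem.List.enumerate items 1).map tripP)
    (fun t => (toLex (t.1, toLex t.2) : Int ×ₗ (Int ×ₗ Int))) false with hkdef
  have hperm : keyedB.Perm ((PySem.List.enumerate items 1).map tripP) :=
    PySem.List.sorted_perm _ _ _
  refine loopPC items _ [] keyedB [] [] [] ?_ (by simpa using hperm) ?_ (by simp) ?_ ?_ (by simp)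
  · -- nodup of indices
    simp only [List.nil_append]
    have h1 : (((PySem.List.enumerate items 1).map tripP).map (fun t => t.2.2)).Nodup := by
      rw [List.map_map]
      have h2 : ((PySem.List.enumerate items 1).map (fun p => p.1)).Pairwise (· < ·) :=
        List.pairwise_map.mpr (PySem.List.pairwise_lt_enumerate items 1)
      exact (h2.imp ne_of_lt)
    exact ((hperm.map (fun t => t.2.2)).symm).nodup h1
  · -- sortedness of debuffs
    refine List.pairwise_map.mpr ?_
    have h2 := PySem.List.sorted_pairwise ((PySem.List.enumerate items 1).map tripP)
      (fun t => (toLex (t.1, toLex t.2) : Int ×ₗ (Int ×ₗ Int)))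
    refine h2.imp ?_
    intro a b hk
    rcases Prod.Lex.le_iff.mp hk with hlt | ⟨heq, _⟩
    · exact le_of_lt hlt
    · exact le_of_eq heq
  · -- initial cutoff
    refine ⟨-2147483749, by simp, ?_, ?_⟩
    · intro t ht
      obtain ⟨p, hp, rfl⟩ := List.mem_map.mp (hperm.subset ht)
      obtain ⟨k, hk, rfl⟩ := (PySem.List.mem_enumerate_iff _ _ _).mp hp
      have hmem : items[k] ∈ items := List.getElem_mem hk
      rcases pyGetD_mem_or items[k] 1 0 with h0 | hm
      · simp only [tripP, h0]; omega
      · have := hi _ hmem _ hm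
        simp only [tripP]; omega
    · intro h hmem
      have := hh h ((PySem.List.mem_sorted _ _ _ _).mp hmem)
      omega
  · -- healths sorted
    exact PySem.List.sorted_pairwise healths (fun x => x)

-- ===== VERDICT (by name: the statement is the Claim_ definition above) =====
theorem solution_spec : Claim_equal_solution := by
  intro healths items hdom _
  unfold Dom_solution at hdom
  rw [Bool.and_eq_true] at hdom
  obtain ⟨h1, h2⟩ := hdom
  have hh : ∀ x ∈ healths, -2147483648 ≤ x := by
    intro x hx
    have h5 := List.all_eq_true.mp h1 x hx
    simp only [pvDomInt, decide_eq_true_eq] at h5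
    exact h5.1
  have hi : ∀ it ∈ items, ∀ v ∈ it, -2147483648 ≤ v := by
    intro it hit v hv
    have h3 := List.all_eq_true.mp h2 it hit
    simp only [List.all_eq_true] at h3
    have h4 := h3 v hv
    simp only [pvDomInt, decide_eq_true_eq] at h4
    exact h4.1
  unfold Spec_solution solution solution_alt
  rw [keyed_eq]
  congr 1
  rw [loop_rel _ _ _ [] _ (by simp) (by simp)]
  exact glue healths items hh hi
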